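-- pv_equiv track=rewrite | github.com/MatthijsBiondina/Advent-Of-Code-2021 | day_14.py | step
-- ===== SOURCE A (Python) =====
-- from copy import copy, deepcopy
--
-- def step(old, rls):
--     new = deepcopy(old)
--     for rule in rls:
--         try:
--             occurrences = old[rule]
--             new[rule] -= occurrences
--         except KeyError:
--             occurrences = 0
--
--         for repl in rls[rule]:
--             try:
--                 new[repl] += occurrences
--             except KeyError:
--                 new[repl] = occurrences
--
--     new = {key: new[key] for key in new if new[key] > 0}
--     return new
-- ===== SOURCE B (Python) =====
-- def step(old, rls):
--     # Per-key closed form: each pair's new count is its carried-over count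
--     # (zero if the pair is itself a rule) plus everything the rules produce into it.
--     flat = [p for ps in rls.values() for p in ps]
--     candidates = dict.fromkeys(list(old) + flat)
--
--     def new_count(k):
--         base = 0 if k in rls else old.get(k, 0)
--         return base + sum(old.get(r, 0) * ps.count(k) for r, ps in rls.items())
--
--     return {k: c for k in candidates if (c := new_count(k)) > 0}
-- ===== Notes on version B (the rewrite author's own statement) =====
-- stated objective: alternative
-- what changed: B computes each candidate pair's new count by a per-key closed form (carried-over count, zeroed when the pair is a rule, plus the counts all rules produce into it) over the deduplicated candidate keys, instead of A's deepcopy-and-mutate loop over the rules with try/except.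
import Mathlib
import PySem

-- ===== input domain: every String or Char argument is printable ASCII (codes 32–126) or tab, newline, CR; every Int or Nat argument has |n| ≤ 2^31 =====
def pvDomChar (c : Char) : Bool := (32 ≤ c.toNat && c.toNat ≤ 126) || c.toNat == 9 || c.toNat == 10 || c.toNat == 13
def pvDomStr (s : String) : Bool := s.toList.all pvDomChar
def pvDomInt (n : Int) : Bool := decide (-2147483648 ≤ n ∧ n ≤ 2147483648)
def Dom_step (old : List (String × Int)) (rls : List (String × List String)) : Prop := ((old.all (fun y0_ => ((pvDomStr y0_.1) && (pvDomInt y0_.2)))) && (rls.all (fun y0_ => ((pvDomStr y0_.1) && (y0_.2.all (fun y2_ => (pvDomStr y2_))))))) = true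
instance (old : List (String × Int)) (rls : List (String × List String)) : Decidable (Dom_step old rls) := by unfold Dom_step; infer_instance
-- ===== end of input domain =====

-- B replaces A's deepcopy-and-mutate rule loop by a per-key closed form over the
-- deduplicated candidate keys (objective: alternative).

-- ===== PORT A =====
-- old and rls are Python dicts: the assoc-list arguments are converted at the boundary with
-- PySem.Dict.ofList (insertion order, later value overwrites), then A's code is transliterated.
def step (old : List (String × Int)) (rls : List (String × List String)) : List (String × Int) :=
  let oldD : PySem.Dict String Int := PySem.Dict.ofList old
  let rlsD : PySem.Dict String (List String) := PySem.Dict.ofList rls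
  -- new = deepcopy(old)
  -- for rule in rls: try: occurrences = old[rule]; new[rule] -= occurrences; except KeyError: occurrences = 0
  --                  for repl in rls[rule]: try: new[repl] += occurrences; except KeyError: new[repl] = occurrences
  let new := rlsD.keys.foldl (fun (new : PySem.Dict String Int) rule =>
      let occ : Int := oldD.getD rule 0      -- occurrences (0 in the KeyError branch)
      let new := if oldD.contains rule then new.modify rule 0 (fun v => v - occ) else new
      (rlsD.getD rule []).foldl (fun n repl => n.modify repl 0 (fun v => v + occ)) new)
    oldD
  -- new = {key: new[key] for key in new if new[key] > 0}
  (new.keys.filter (fun k => decide (0 < new.getD k 0))).map (fun k => (k, new.getD k 0))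

-- ===== PORT B =====
def step_alt (old : List (String × Int)) (rls : List (String × List String)) : List (String × Int) :=
  let oldD : PySem.Dict String Int := PySem.Dict.ofList old
  let rlsD : PySem.Dict String (List String) := PySem.Dict.ofList rls
  -- flat = [p for ps in rls.values() for p in ps]
  let flat := rlsD.values.flatten
  -- candidates = dict.fromkeys(list(old) + flat)
  let candidates := PySem.List.dedup (oldD.keys ++ flat)
  -- new_count(k) = (0 if k in rls else old.get(k, 0)) + sum(old.get(r, 0) * ps.count(k) for r, ps in rls.items())
  let newCount : String → Int := fun k =>
    (if rlsD.contains k then 0 else oldD.getD k 0)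
      + (rlsD.items.map (fun rp => oldD.getD rp.1 0 * (rp.2.count k : Int))).sum
  -- {k: c for k in candidates if (c := new_count(k)) > 0}
  (candidates.filter (fun k => decide (0 < newCount k))).map (fun k => (k, newCount k))

-- ===== PRECONDITION & SPEC =====
def Spec_step (old : List (String × Int)) (rls : List (String × List String)) (out : List (String × Int)) : Prop := out = step_alt old rls
instance (old : List (String × Int)) (rls : List (String × List String)) (out : List (String × Int)) : Decidable (Spec_step old rls out) := by unfold Spec_step; infer_instance

-- ===== CLAIM (what is proved, stated in full; the proofs are below) =====
def Claim_equal_step : Prop := ∀ (old : List (String × Int)) (rls : List (String × List String)), Dom_step old rls → Spec_step old rls (step old rls)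

-- ===== LEMMAS AND PROOFS =====

theorem pv_innerA_getD (ps : List String) (occ : Int) (n : PySem.Dict String Int) (k : String) :
    (ps.foldl (fun n repl => n.modify repl 0 (fun v => v + occ)) n).getD k 0
      = n.getD k 0 + occ * (ps.count k : Int) := by
  induction ps generalizing n with
  | nil => simp
  | cons p ps ih =>
    simp only [List.foldl_cons, ih, PySem.Dict.getD_modify, List.count_cons]
    by_cases h : k = p
    · subst h; simp only [beq_self_eq_true, if_true]; push_cast; ring
    · rw [if_neg h, if_neg (by simpa [beq_iff_eq] using Ne.symm h)]
      simp

theorem pv_outerA_getD (oldD : PySem.Dict String Int) (rlsD : PySem.Dict String (List String))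
    (ks : List String) (n : PySem.Dict String Int) (k : String) :
    ((ks.foldl (fun (new : PySem.Dict String Int) rule =>
        let occ : Int := oldD.getD rule 0
        let new := if oldD.contains rule then new.modify rule 0 (fun v => v - occ) else new
        (rlsD.getD rule []).foldl (fun n repl => n.modify repl 0 (fun v => v + occ)) new) n).getD k 0)
      = n.getD k 0
        + (ks.map (fun r => oldD.getD r 0 * ((rlsD.getD r []).count k : Int))).sum
        - (if oldD.contains k then (ks.count k : Int) * oldD.getD k 0 else 0) := by
  induction ks generalizing n with
  | nil => simp
  | cons r ks ih =>
    simp only [List.foldl_cons, ih, List.map_cons, List.sum_cons, List.count_cons]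
    rw [pv_innerA_getD]
    by_cases hc : oldD.contains r
    · simp only [hc, if_true]
      by_cases h : k = r
      · subst h
        simp only [hc, if_true, beq_self_eq_true, PySem.Dict.getD_modify]
        push_cast; ring
      · have hrk : ¬ (r == k) = true := by simpa [beq_iff_eq] using Ne.symm h
        rw [PySem.Dict.getD_modify, if_neg h, if_neg hrk]
        by_cases hck : oldD.contains k <;> simp only [hck, if_true, if_false, Bool.false_eq_true]
        · push_cast; ring
        · ring
    · simp only [hc, if_false, Bool.false_eq_true]
      have hz : oldD.getD r 0 = 0 := PySem.Dict.getD_of_not_contains oldD 0 (by simpa using hc)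
      by_cases h : r = k
      · subst h
        have hck : ¬ oldD.contains r = true := hc
        simp [hz, hck]
      · have hrk : ¬ (r == k) = true := by simpa [beq_iff_eq] using h
        by_cases hck : oldD.contains k <;>
          simp only [hck, hrk, if_true, if_false, Bool.false_eq_true, hz] <;>
          push_cast <;> ring

theorem pv_outerA_keys (oldD : PySem.Dict String Int) (rlsD : PySem.Dict String (List String))
    (ks : List String) (n : PySem.Dict String Int) (hsub : ∀ x, oldD.contains x = true → x ∈ n.keys) :
    ((ks.foldl (fun (new : PySem.Dict String Int) rule =>
        let occ : Int := oldD.getD rule 0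
        let new := if oldD.contains rule then new.modify rule 0 (fun v => v - occ) else new
        (rlsD.getD rule []).foldl (fun n repl => n.modify repl 0 (fun v => v + occ)) new) n).keys)
      = PySem.Set.update n.keys (ks.flatMap (fun r => rlsD.getD r [])) := by
  induction ks generalizing n with
  | nil => simp [PySem.Set.update]
  | cons r ks ih =>
    simp only [List.foldl_cons, List.flatMap_cons]
    rw [PySem.Set.update_append]
    set occ : Int := oldD.getD r 0 with hocc
    have hcondkeys :
        (if oldD.contains r then n.modify r 0 (fun v => v - occ) else n).keys = n.keys := by
      by_cases hc : oldD.contains r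
      · rw [if_pos hc, PySem.Dict.keys_modify,
          PySem.Dict.keys_insert_of_contains _ _
            ((PySem.Dict.contains_iff_mem_keys n r).2 (hsub r hc))]
      · rw [if_neg hc]
    have hinner :
        ((rlsD.getD r []).foldl (fun n repl => n.modify repl 0 (fun v => v + occ))
          (if oldD.contains r then n.modify r 0 (fun v => v - occ) else n)).keys
        = PySem.Set.update n.keys (rlsD.getD r []) := by
      rw [PySem.Dict.keys_foldl_modify _ _ (fun _ _ v => v + occ), hcondkeys]
    rw [ih _ (fun x hx => by
        rw [hinner]
        exact (PySem.Set.mem_update _ _ _).2 (Or.inl (hsub x hx))), hinner]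

-- the carried-over part of the closed form agrees with A's subtraction
theorem pv_base (oldD : PySem.Dict String Int) (rlsD : PySem.Dict String (List String))
    (hR : rlsD.keys.Nodup) (k : String) :
    (if rlsD.contains k then (0 : Int) else oldD.getD k 0)
      = oldD.getD k 0 - (if oldD.contains k then (rlsD.keys.count k : Int) * oldD.getD k 0 else 0) := by
  have hcount : (rlsD.keys.count k : Int) = if rlsD.contains k then 1 else 0 := by
    by_cases hc : rlsD.contains k
    · rw [if_pos hc]
      have hk : k ∈ rlsD.keys := (PySem.Dict.contains_iff_mem_keys _ _).1 hc
      exact_mod_cast List.count_eq_one_of_mem hR hk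
    · rw [if_neg hc, List.count_eq_zero_of_not_mem]
      · rfl
      · exact fun hk => hc ((PySem.Dict.contains_iff_mem_keys _ _).2 hk)
  rw [hcount]
  by_cases hRk : rlsD.contains k
  · by_cases hOk : oldD.contains k
    · simp [hRk, hOk]
    · have hz : oldD.getD k 0 = 0 := PySem.Dict.getD_of_not_contains oldD 0 (by simpa using hOk)
      simp [hRk, hOk, hz]
  · by_cases hOk : oldD.contains k <;> simp [hRk, hOk]

-- ===== VERDICT (by name: the statement is the Claim_ definition above) =====
theorem step_spec : Claim_equal_step := by
  intro old rls _
  unfold Spec_step step step_alt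
  set oldD : PySem.Dict String Int := PySem.Dict.ofList old with hod
  set rlsD : PySem.Dict String (List String) := PySem.Dict.ofList rls with hrd
  have hO : oldD.keys.Nodup := PySem.Dict.nodup_keys_ofList old
  have hR : rlsD.keys.Nodup := PySem.Dict.nodup_keys_ofList rls
  have hflat : rlsD.values.flatten = rlsD.keys.flatMap (fun r => rlsD.getD r []) := by
    rw [PySem.Dict.values_eq_map_keys rlsD hR [], List.flatMap_def]
  -- the two key lists coincide
  have hAkeys := pv_outerA_keys oldD rlsD rlsD.keys oldD
      (fun x hx => (PySem.Dict.contains_iff_mem_keys oldD x).1 hx)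
  have hBkeys : PySem.List.dedup (oldD.keys ++ rlsD.values.flatten)
      = PySem.Set.update oldD.keys (rlsD.keys.flatMap (fun r => rlsD.getD r [])) := by
    rw [PySem.List.dedup_eq_ofList, PySem.Set.ofList_append,
      PySem.Set.ofList_eq_self_of_nodup _ hO, hflat]
  -- the two value tables coincide
  have hval : ∀ k,
      ((rlsD.keys.foldl (fun (new : PySem.Dict String Int) rule =>
          let occ : Int := oldD.getD rule 0
          let new := if oldD.contains rule then new.modify rule 0 (fun v => v - occ) else new
          (rlsD.getD rule []).foldl (fun n repl => n.modify repl 0 (fun v => v + occ)) new) oldD).getD k 0)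
      = (if rlsD.contains k then (0 : Int) else oldD.getD k 0)
          + (rlsD.items.map (fun rp => oldD.getD rp.1 0 * (rp.2.count k : Int))).sum := by
    intro k
    rw [pv_outerA_getD, pv_base oldD rlsD hR k,
      PySem.Dict.items_eq_map_keys rlsD hR [], List.map_map]
    simp only [Function.comp_def]
    ring
  simp only [hAkeys, hBkeys, hval]
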